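-- pv_equiv track=rewrite | github.com/b-pardi/VibeCodeReporter | training/diffs/collect.py | truncate_diff_to_match_code
-- ===== SOURCE A (Python) =====
-- def truncate_diff_to_match_code(diff: str, target_code_len: int) -> str:
--     """Truncate diff lines until the stripped code output reaches target_code_len chars.
--
--     Iterates line by line through the diff, accumulating the code character count
--     (only '+' and ' ' lines contribute). Stops as soon as the accumulated code length
--     meets or exceeds target_code_len. This ensures the diff parquet and code parquet
--     cover exactly the same amount of actual code content.
--     """
--     diff_lines = diff.splitlines()
--     code_len = 0
--     n_code_lines = 0
--     for i, line in enumerate(diff_lines):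
--         if line.startswith('+') or line.startswith(' '):
--             if n_code_lines > 0:
--                 code_len += 1  # '\n' separator added by strip_diff_to_code's join
--             code_len += len(line) - 1  # strip the leading marker character
--             n_code_lines += 1
--         if code_len >= target_code_len:
--             return '\n'.join(diff_lines[:i + 1])
--     return diff  # target not reached; return full diff
-- ===== SOURCE B (Python) =====
-- def truncate_diff_to_match_code(diff: str, target_code_len: int) -> str:
--     """Three-pass reformulation: per-line code-length contributions, running
--     totals, then the first index reaching the target."""
--     lines = diff.splitlines()
--     # pass 1: each line's contribution to the stripped-code length
--     sums = []
--     seen = False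
--     for line in lines:
--         if line.startswith(('+', ' ')):
--             sums.append(len(line) - 1 + (1 if seen else 0))
--             seen = True
--         else:
--             sums.append(0)
--     # pass 2: turn contributions into running totals in place
--     for i in range(1, len(sums)):
--         sums[i] += sums[i - 1]
--     # pass 3: first index whose running total reaches the target
--     idx = next((i for i, s in enumerate(sums) if s >= target_code_len), None)
--     if idx is None:
--         return diff
--     return '\n'.join(lines[:idx + 1])
-- ===== Notes on version B (the rewrite author's own statement) =====
-- stated objective: alternative
-- what changed: Replaces A's single fused loop with mutable counters and an early return by a three-pass pipeline: map each line to its code-length contribution, form running totals, then find the first index reaching the target and join that prefix.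
import Mathlib
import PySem

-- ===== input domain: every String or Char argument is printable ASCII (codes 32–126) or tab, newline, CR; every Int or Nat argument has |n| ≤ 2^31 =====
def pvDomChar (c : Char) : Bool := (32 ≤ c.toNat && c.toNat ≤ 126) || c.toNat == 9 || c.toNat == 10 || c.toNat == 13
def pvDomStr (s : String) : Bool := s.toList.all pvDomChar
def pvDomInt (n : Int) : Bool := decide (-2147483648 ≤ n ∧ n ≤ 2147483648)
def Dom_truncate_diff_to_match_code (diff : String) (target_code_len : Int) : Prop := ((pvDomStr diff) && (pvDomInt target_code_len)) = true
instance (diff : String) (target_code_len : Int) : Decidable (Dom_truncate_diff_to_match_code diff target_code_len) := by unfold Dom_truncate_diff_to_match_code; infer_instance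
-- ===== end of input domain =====

-- B replaces A's single fused loop (mutable counters, early return) by a three-pass
-- pipeline: per-line contributions, running totals, first index reaching the target.


-- ===== PORT A =====
-- A's for-loop: remaining lines, collected prefix, code_len / n_code_lines counters,
-- unconditional threshold check, early return of the joined prefix.
def aGo : List String → List String → Int → Int → String → Int → String
  | [], _, _, _, diff, _ => diff
  | line :: rest, taken, code_len, n_code, diff, target =>
    let isC := PySem.Str.startswith line "+" || PySem.Str.startswith line " "
    let code_len' :=
      if isC then (if n_code > 0 then code_len + 1 else code_len) + (PySem.Str.len line - 1)
      else code_len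
    let n_code' := if isC then n_code + 1 else n_code
    if code_len' ≥ target then PySem.Str.join "\n" (taken ++ [line])
    else aGo rest (taken ++ [line]) code_len' n_code' diff target

def truncate_diff_to_match_code (diff : String) (target_code_len : Int) : String :=
  aGo (PySem.Str.splitlines diff) [] 0 0 diff target_code_len

-- ===== PORT B =====
-- pass 1: each line's contribution to the stripped-code length
def bContribs : List String → Bool → List Int
  | [], _ => []
  | line :: rest, seen =>
    if PySem.Str.startswith line "+" || PySem.Str.startswith line " " then
      (PySem.Str.len line - 1 + (if seen then 1 else 0)) :: bContribs rest true
    else 0 :: bContribs rest seen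

-- pass 2: running totals
def bAccum : List Int → Int → List Int
  | [], _ => []
  | x :: xs, acc => (acc + x) :: bAccum xs (acc + x)

-- pass 3: first index whose running total reaches the target
def bFirstGe : List Int → Int → Option Nat
  | [], _ => none
  | s :: ss, t => if s ≥ t then some 0 else (bFirstGe ss t).map (· + 1)

def truncate_diff_to_match_code_alt (diff : String) (target_code_len : Int) : String :=
  let lines := PySem.Str.splitlines diff
  match bFirstGe (bAccum (bContribs lines false) 0) target_code_len with
  | some i => PySem.Str.join "\n" (lines.take (i + 1))
  | none => diff

-- ===== PRECONDITION & SPEC =====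
def Spec_truncate_diff_to_match_code (diff : String) (target_code_len : Int) (out : String) : Prop := out = truncate_diff_to_match_code_alt diff target_code_len
instance (diff : String) (target_code_len : Int) (out : String) : Decidable (Spec_truncate_diff_to_match_code diff target_code_len out) := by unfold Spec_truncate_diff_to_match_code; infer_instance

-- ===== CLAIM (what is proved, stated in full; the proofs are below) =====
def Claim_equal_truncate_diff_to_match_code : Prop := ∀ (diff : String) (target_code_len : Int), Dom_truncate_diff_to_match_code diff target_code_len → Spec_truncate_diff_to_match_code diff target_code_len (truncate_diff_to_match_code diff target_code_len)

-- ===== LEMMAS AND PROOFS =====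
theorem match_map_succ (o : Option Nat) (f : Nat → String) (d : String) :
    (match o.map (· + 1) with | some i => f i | none => d)
      = match o with | some j => f (j + 1) | none => d := by
  cases o <;> simp

theorem aGo_eq_b (rest : List String) : ∀ (taken : List String) (c n : Int) (diff : String)
    (t : Int), 0 ≤ n →
    aGo rest taken c n diff t =
      match bFirstGe (bAccum (bContribs rest (decide (0 < n))) c) t with
      | some i => PySem.Str.join "\n" (taken ++ rest.take (i + 1))
      | none => diff := by
  induction rest with
  | nil => intro taken c n diff t hn; simp [aGo, bContribs, bAccum, bFirstGe]
  | cons line ls ih =>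
    intro taken c n diff t hn
    by_cases hc : (PySem.Str.startswith line "+" || PySem.Str.startswith line " ") = true
    · by_cases h0 : 0 < n
      · have hd : decide (0 < n) = true := by simpa using h0
        simp only [aGo, bContribs, bAccum, bFirstGe, hc, hd, if_pos h0, if_true]
        rw [show c + 1 + (PySem.Str.len line - 1) = c + (PySem.Str.len line - 1 + 1) from by ring]
        by_cases ht : c + (PySem.Str.len line - 1 + 1) ≥ t
        · rw [if_pos ht, if_pos ht]; simp
        · rw [if_neg ht, if_neg ht]
          rw [ih (taken ++ [line]) (c + (PySem.Str.len line - 1 + 1)) (n + 1) diff t (by omega)]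
          rw [show (decide (0 < n + 1)) = true from by simp; omega, match_map_succ]
          cases bFirstGe (bAccum (bContribs ls true) (c + (PySem.Str.len line - 1 + 1))) t with
          | none => rfl
          | some j => simp [List.take_succ_cons]
      · have hd : decide (0 < n) = false := by simpa using h0
        simp only [aGo, bContribs, bAccum, bFirstGe, hc, hd, if_neg h0, if_true,
          Bool.false_eq_true, if_false, add_zero]
        by_cases ht : c + (PySem.Str.len line - 1) ≥ t
        · rw [if_pos ht, if_pos ht]; simp
        · rw [if_neg ht, if_neg ht]
          rw [ih (taken ++ [line]) (c + (PySem.Str.len line - 1)) (n + 1) diff t (by omega)]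
          rw [show (decide (0 < n + 1)) = true from by simp; omega, match_map_succ]
          cases bFirstGe (bAccum (bContribs ls true) (c + (PySem.Str.len line - 1))) t with
          | none => rfl
          | some j => simp [List.take_succ_cons]
    · simp only [aGo, bContribs, bAccum, bFirstGe, hc, if_false, Bool.false_eq_true, add_zero]
      by_cases ht : c ≥ t
      · rw [if_pos ht, if_pos ht]; simp
      · rw [if_neg ht, if_neg ht]
        rw [ih (taken ++ [line]) c n diff t hn, match_map_succ]
        cases bFirstGe (bAccum (bContribs ls (decide (0 < n))) c) t with
        | none => rfl
        | some j => simp [List.take_succ_cons]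

-- ===== VERDICT (by name: the statement is the Claim_ definition above) =====
theorem truncate_diff_to_match_code_spec : Claim_equal_truncate_diff_to_match_code := by
  intro diff target _
  unfold Spec_truncate_diff_to_match_code truncate_diff_to_match_code truncate_diff_to_match_code_alt
  rw [aGo_eq_b (PySem.Str.splitlines diff) [] 0 0 diff target (by omega)]
  rw [show (decide ((0:Int) < 0)) = false from rfl]
  cases h : bFirstGe (bAccum (bContribs (PySem.Str.splitlines diff) false) 0) target <;>
    simp only [h, List.nil_append]
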